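-- pv_equiv track=rewrite | github.com/athul-vinayak/HeadSpin | Date.py | daycheck
-- ===== SOURCE A (Python) =====
-- def daycheck(month,day,year):
--     monthlist1 = [1,3,5,7,8,10,12]
--     monthlist2 = [4,6,9,11]
--     monthlist3 = 2
--     for mon in monthlist1:
--         if month == mon:
--             if day >=1 and day <= 31:
--                 return True
--             else:
--                 return False
--     for mon in monthlist2:
--         if month == mon:
--             if day >= 1 and day <= 30:
--                 return True
--             else:
--                 return False
--     if month == monthlist3:
--         if(year % 4)==0:
--             if(year % 100)==0:
--                 if(year % 400)==0:
--                     if day >=1 and day <= 29: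
--                         return True
--                     else:
--                         return False
--                 else:
--                     if day >=1 and day <= 28:
--                         return True
--                     else:
--                         return False
--             else:
--                 if day >=1 and day <= 29:
--                     return True
--                 else:
--                     return False
--         else:
--             if day >=1 and day <= 28:
--                 return True
--             else:
--                 return False
-- ===== SOURCE B (Python) =====
-- def daycheck(month, day, year):
--     leap = year % 4 == 0 and (year % 100 != 0 or year % 400 == 0)
--     maxdays = {1: 31, 2: 29 if leap else 28, 3: 31, 4: 30, 5: 31, 6: 30,
--                7: 31, 8: 31, 9: 30, 10: 31, 11: 30, 12: 31}
--     if month not in maxdays: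
--         return None
--     return 1 <= day <= maxdays[month]
-- ===== Notes on version B (the rewrite author's own statement) =====
-- stated objective: simpler
-- what changed: Replaces A's two list-scanning loops and the four-level nested leap-year if-tree with one month->max-days table (February computed from a flat closed-form leap boolean) and a single range comparison.
import Mathlib
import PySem

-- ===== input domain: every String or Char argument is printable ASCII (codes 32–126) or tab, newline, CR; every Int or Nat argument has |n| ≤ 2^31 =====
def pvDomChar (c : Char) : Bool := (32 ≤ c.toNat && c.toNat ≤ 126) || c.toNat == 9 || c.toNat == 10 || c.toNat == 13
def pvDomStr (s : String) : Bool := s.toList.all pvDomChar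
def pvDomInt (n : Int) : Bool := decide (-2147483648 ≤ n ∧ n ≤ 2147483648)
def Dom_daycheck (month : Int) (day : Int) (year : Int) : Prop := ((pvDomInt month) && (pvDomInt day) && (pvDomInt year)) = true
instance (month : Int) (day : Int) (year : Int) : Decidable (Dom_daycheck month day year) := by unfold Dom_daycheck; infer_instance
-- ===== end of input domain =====

-- B replaces A's list-scanning loops and nested leap-year branches with a month->max-days table and one range comparison (simpler decomposition; same cost).


-- ===== PORT A =====
-- Loop 'for mon in monthlist1: if month == mon: return (1<=day<=31)'
def scan31 (xs : List Int) (month : Int) (day : Int) : Option Bool :=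
  match xs with
  | [] => none
  | mon :: rest =>
    if month == mon then some (decide (1 ≤ day ∧ day ≤ 31)) else scan31 rest month day

-- Loop 'for mon in monthlist2: if month == mon: return (1<=day<=30)'
def scan30 (xs : List Int) (month : Int) (day : Int) : Option Bool :=
  match xs with
  | [] => none
  | mon :: rest =>
    if month == mon then some (decide (1 ≤ day ∧ day ≤ 30)) else scan30 rest month day

def daycheck (month : Int) (day : Int) (year : Int) : Option Bool :=
  let monthlist1 : List Int := [1,3,5,7,8,10,12]
  let monthlist2 : List Int := [4,6,9,11]
  let monthlist3 : Int := 2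
  match scan31 monthlist1 month day with
  | some b => some b
  | none =>
  match scan30 monthlist2 month day with
  | some b => some b
  | none =>
  if month == monthlist3 then
    if PySem.Int.mod year 4 == 0 then
      if PySem.Int.mod year 100 == 0 then
        if PySem.Int.mod year 400 == 0 then
          some (decide (1 ≤ day ∧ day ≤ 29))
        else
          some (decide (1 ≤ day ∧ day ≤ 28))
      else
        some (decide (1 ≤ day ∧ day ≤ 29))
    else
      some (decide (1 ≤ day ∧ day ≤ 28))
  else none

-- ===== PORT B =====
def daycheck_alt (month : Int) (day : Int) (year : Int) : Option Bool :=
  let leap : Bool := PySem.Int.mod year 4 == 0 && (PySem.Int.mod year 100 != 0 || PySem.Int.mod year 400 == 0)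
  let maxdays : PySem.Dict Int Int := PySem.Dict.ofList
    [(1,31),(2, if leap then 29 else 28),(3,31),(4,30),(5,31),(6,30),
     (7,31),(8,31),(9,30),(10,31),(11,30),(12,31)]
  match maxdays.get? month with
  | none => none
  | some md => some (decide (1 ≤ day ∧ day ≤ md))

-- ===== PRECONDITION & SPEC =====
def Spec_daycheck (month : Int) (day : Int) (year : Int) (out : Option Bool) : Prop := out = daycheck_alt month day year
instance (month : Int) (day : Int) (year : Int) (out : Option Bool) : Decidable (Spec_daycheck month day year out) := by unfold Spec_daycheck; infer_instance

-- ===== CLAIM (what is proved, stated in full; the proofs are below) =====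
def Claim_equal_daycheck : Prop := ∀ (month : Int) (day : Int) (year : Int), Dom_daycheck month day year → Spec_daycheck month day year (daycheck month day year)

-- ===== LEMMAS AND PROOFS =====

-- ===== VERDICT (by name: the statement is the Claim_ definition above) =====
set_option maxHeartbeats 2000000 in
theorem daycheck_spec : Claim_equal_daycheck := by
  intro month day year _
  unfold Spec_daycheck
  by_cases h1 : 1 ≤ month ∧ month ≤ 12
  · obtain ⟨hl, hr⟩ := h1
    interval_cases month <;>
      simp only [daycheck, daycheck_alt, scan31, scan30] <;>
      norm_num [PySem.Dict.ofList, PySem.Dict.update, PySem.Dict.insert, PySem.Dict.empty,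
                PySem.Dict.get?, List.find?] <;>
      split_ifs <;> (try simp_all)
  · have h2 : month < 1 ∨ 12 < month := by omega
    have e1 : ((1:Int) == month) = false := by rw [beq_eq_false_iff_ne]; omega
    have f1 : ((month == (1:Int))) = false := by rw [beq_eq_false_iff_ne]; omega
    have e2 : ((2:Int) == month) = false := by rw [beq_eq_false_iff_ne]; omega
    have f2 : ((month == (2:Int))) = false := by rw [beq_eq_false_iff_ne]; omega
    have e3 : ((3:Int) == month) = false := by rw [beq_eq_false_iff_ne]; omega
    have f3 : ((month == (3:Int))) = false := by rw [beq_eq_false_iff_ne]; omega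
    have e4 : ((4:Int) == month) = false := by rw [beq_eq_false_iff_ne]; omega
    have f4 : ((month == (4:Int))) = false := by rw [beq_eq_false_iff_ne]; omega
    have e5 : ((5:Int) == month) = false := by rw [beq_eq_false_iff_ne]; omega
    have f5 : ((month == (5:Int))) = false := by rw [beq_eq_false_iff_ne]; omega
    have e6 : ((6:Int) == month) = false := by rw [beq_eq_false_iff_ne]; omega
    have f6 : ((month == (6:Int))) = false := by rw [beq_eq_false_iff_ne]; omega
    have e7 : ((7:Int) == month) = false := by rw [beq_eq_false_iff_ne]; omega
    have f7 : ((month == (7:Int))) = false := by rw [beq_eq_false_iff_ne]; omega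
    have e8 : ((8:Int) == month) = false := by rw [beq_eq_false_iff_ne]; omega
    have f8 : ((month == (8:Int))) = false := by rw [beq_eq_false_iff_ne]; omega
    have e9 : ((9:Int) == month) = false := by rw [beq_eq_false_iff_ne]; omega
    have f9 : ((month == (9:Int))) = false := by rw [beq_eq_false_iff_ne]; omega
    have e10 : ((10:Int) == month) = false := by rw [beq_eq_false_iff_ne]; omega
    have f10 : ((month == (10:Int))) = false := by rw [beq_eq_false_iff_ne]; omega
    have e11 : ((11:Int) == month) = false := by rw [beq_eq_false_iff_ne]; omega
    have f11 : ((month == (11:Int))) = false := by rw [beq_eq_false_iff_ne]; omega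
    have e12 : ((12:Int) == month) = false := by rw [beq_eq_false_iff_ne]; omega
    have f12 : ((month == (12:Int))) = false := by rw [beq_eq_false_iff_ne]; omega
    simp only [daycheck, daycheck_alt, scan31, scan30]
    norm_num [PySem.Dict.ofList, PySem.Dict.update, PySem.Dict.insert, PySem.Dict.empty,
              PySem.Dict.get?, List.find?, e1, e2, e3, e4, e5, e6, e7, e8, e9, e10, e11, e12,
              f1, f2, f3, f4, f5, f6, f7, f8, f9, f10, f11, f12]
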